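-- pv_equiv track=rewrite | github.com/johnrmann/explorers | src/math/vector2.py | vector2_rotate_points
-- ===== SOURCE A (Python) =====
-- def vector2_rotate_points(ps, quarter_turns=0):
-- 	"""
-- 	Rotates points by clockwise quarter turns.
-- 	"""
-- 	if quarter_turns >= 4:
-- 		return vector2_rotate_points(ps, quarter_turns=quarter_turns % 4)
-- 	if quarter_turns == 1:
-- 		return [(y, -x) for x, y in ps]
-- 	elif quarter_turns == 2:
-- 		return [(-x, -y) for x, y in ps]
-- 	elif quarter_turns == 3:
-- 		return [(-y, x) for x, y in ps]
-- 	return ps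
-- ===== SOURCE B (Python) =====
-- def vector2_rotate_points(ps, quarter_turns=0):
-- 	"""
-- 	Rotates points by clockwise quarter turns, iterating one base rotation.
-- 	"""
-- 	q = quarter_turns % 4 if quarter_turns >= 4 else quarter_turns
-- 	if q not in (1, 2, 3):
-- 		return ps
-- 	result = ps
-- 	for _ in range(q):
-- 		result = [(y, -x) for x, y in result]
-- 	return result
-- ===== Notes on version B (the rewrite author's own statement) =====
-- stated objective: alternative
-- what changed: B normalizes the turn count once and iterates the single base rotation (y,-x) q times, instead of A's recursion plus four closed-form branch formulas.
import Mathlib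
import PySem

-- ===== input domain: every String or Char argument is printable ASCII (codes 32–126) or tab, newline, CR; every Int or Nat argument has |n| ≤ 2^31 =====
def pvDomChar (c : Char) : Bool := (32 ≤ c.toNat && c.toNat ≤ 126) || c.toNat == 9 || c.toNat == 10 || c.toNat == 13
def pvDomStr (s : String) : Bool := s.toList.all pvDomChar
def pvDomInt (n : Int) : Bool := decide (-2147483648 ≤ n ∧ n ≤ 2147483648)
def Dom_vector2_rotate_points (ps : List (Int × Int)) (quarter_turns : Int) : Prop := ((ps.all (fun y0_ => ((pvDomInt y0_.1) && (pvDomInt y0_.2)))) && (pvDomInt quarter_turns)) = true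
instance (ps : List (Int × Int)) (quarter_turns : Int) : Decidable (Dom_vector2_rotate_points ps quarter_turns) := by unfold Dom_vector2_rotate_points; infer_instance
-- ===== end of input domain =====

-- B iterates the single base rotation (y,-x) q times after normalizing q once, instead of A's
-- recursion plus four closed-form branches; same return value everywhere (alternative decomposition).

-- bounds of Python's `% 4` (PySem.Int.mod = Int.fmod); cited by port A's termination proof
lemma pv_mod4 (q : Int) : 0 ≤ PySem.Int.mod q 4 ∧ PySem.Int.mod q 4 < 4 := by
  simp only [PySem.Int.mod]
  rw [Int.fmod_eq_emod]; simp; omega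

-- ===== PORT A =====
-- literal transliteration of A: recursion for quarter_turns >= 4, then the four branches
def vector2_rotate_points (ps : List (Int × Int)) (quarter_turns : Int) : List (Int × Int) :=
  if quarter_turns ≥ 4 then
    vector2_rotate_points ps (PySem.Int.mod quarter_turns 4)
  else if quarter_turns = 1 then
    ps.map (fun p => (p.2, -p.1))
  else if quarter_turns = 2 then
    ps.map (fun p => (-p.1, -p.2))
  else if quarter_turns = 3 then
    ps.map (fun p => (-p.2, p.1))
  else
    ps
termination_by quarter_turns.toNat
decreasing_by
  have := pv_mod4 quarter_turns
  omega

-- ===== PORT B =====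
-- one base clockwise quarter turn
def pvRotOnce (l : List (Int × Int)) : List (Int × Int) :=
  l.map (fun p => (p.2, -p.1))

def vector2_rotate_points_alt (ps : List (Int × Int)) (quarter_turns : Int) : List (Int × Int) :=
  let q := if quarter_turns ≥ 4 then PySem.Int.mod quarter_turns 4 else quarter_turns
  if ¬ (q = 1 ∨ q = 2 ∨ q = 3) then ps
  else (PySem.List.pyRange 0 q 1).foldl (fun r _ => pvRotOnce r) ps

-- ===== PRECONDITION & SPEC =====
def Spec_vector2_rotate_points (ps : List (Int × Int)) (quarter_turns : Int) (out : List (Int × Int)) : Prop := out = vector2_rotate_points_alt ps quarter_turns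
instance (ps : List (Int × Int)) (quarter_turns : Int) (out : List (Int × Int)) : Decidable (Spec_vector2_rotate_points ps quarter_turns out) := by unfold Spec_vector2_rotate_points; infer_instance

-- ===== CLAIM (what is proved, stated in full; the proofs are below) =====
def Claim_equal_vector2_rotate_points : Prop := ∀ (ps : List (Int × Int)) (quarter_turns : Int), Dom_vector2_rotate_points ps quarter_turns → Spec_vector2_rotate_points ps quarter_turns (vector2_rotate_points ps quarter_turns)

-- ===== LEMMAS AND PROOFS =====

lemma pv_base (ps : List (Int × Int)) (q : Int) (h4 : ¬ q ≥ 4) :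
    vector2_rotate_points ps q = vector2_rotate_points_alt ps q := by
  by_cases h1 : q = 1
  · subst h1
    rw [vector2_rotate_points]
    simp [vector2_rotate_points_alt, pvRotOnce]
    have : PySem.List.pyRange 0 1 1 = [0] := by decide
    simp [this, List.foldl]
  · by_cases h2 : q = 2
    · subst h2
      rw [vector2_rotate_points]
      simp [vector2_rotate_points_alt]
      have : PySem.List.pyRange 0 2 1 = [0, 1] := by decide
      simp [this, List.foldl, pvRotOnce, List.map_map, Function.comp]
    · by_cases h3 : q = 3
      · subst h3
        rw [vector2_rotate_points]
        simp [vector2_rotate_points_alt]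
        have : PySem.List.pyRange 0 3 1 = [0, 1, 2] := by decide
        simp [this, List.foldl, pvRotOnce, List.map_map, Function.comp]
      · rw [vector2_rotate_points]
        simp [vector2_rotate_points_alt, h1, h2, h3, h4]

lemma pv_alt_norm (ps : List (Int × Int)) (q : Int) (h : q ≥ 4) :
    vector2_rotate_points_alt ps q = vector2_rotate_points_alt ps (PySem.Int.mod q 4) := by
  simp only [vector2_rotate_points_alt]
  simp [h]

-- ===== VERDICT (by name: the statement is the Claim_ definition above) =====
theorem vector2_rotate_points_spec : Claim_equal_vector2_rotate_points := by
  intro ps qt _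
  show vector2_rotate_points ps qt = vector2_rotate_points_alt ps qt
  by_cases h : qt ≥ 4
  · rw [vector2_rotate_points]
    simp only [h, if_pos]
    rw [pv_alt_norm ps qt h]
    exact pv_base ps _ (by have := pv_mod4 qt; omega)
  · exact pv_base ps qt h
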